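-- pv_equiv track=rewrite | github.com/yuitokyouni/heatmap_GTA | build_dashboard.py | compute_percentile_thresholds
-- ===== SOURCE A (Python) =====
-- def compute_percentile_thresholds(values: list, n_bins: int = 10) -> list:
--     """
--     Compute percentile-based thresholds from data.
--     Returns list of n_bins+1 boundary values for scoring 1 to n_bins.
--     """
--     sorted_vals = sorted(v for v in values if v is not None)
--     if len(sorted_vals) < n_bins:
--         return None
--     thresholds = []
--     for i in range(n_bins + 1):
--         idx = int(i / n_bins * (len(sorted_vals) - 1))
--         thresholds.append(sorted_vals[idx])
--     return thresholds
-- ===== SOURCE B (Python) =====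
-- def compute_percentile_thresholds(values: list, n_bins: int = 10) -> list:
--     """
--     Compute percentile-based thresholds from data.
--     Returns list of n_bins+1 boundary values for scoring 1 to n_bins.
--     Selects only the needed order statistics via a recursive multi-way
--     quickselect instead of fully sorting the data.
--     """
--     vals = [v for v in values if v is not None]
--     n = len(vals)
--     if n < n_bins:
--         return None
--     idxs = [int(i / n_bins * (n - 1)) for i in range(n_bins + 1)]
--     ds = sorted(set(idxs))
--
--     def multiselect(xs, ks):
--         # values of sorted(xs) at the increasing ranks ks
--         if not ks:
--             return []
--         p = xs[len(xs) // 2]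
--         lt = [x for x in xs if x < p]
--         gt = [x for x in xs if p < x]
--         lo = len(lt)
--         hi = len(xs) - len(gt)
--         return (multiselect(lt, [k for k in ks if k < lo])
--                 + [p] * len([k for k in ks if lo <= k and k < hi])
--                 + multiselect(gt, [k - hi for k in ks if hi <= k]))
--
--     lookup = dict(zip(ds, multiselect(vals, ds)))
--     return [lookup[i] for i in idxs]
-- ===== Notes on version B (the rewrite author's own statement) =====
-- stated objective: alternative
-- what changed: B replaces the full sort with a recursive multi-way quickselect (middle-element pivot) that extracts only the n_bins+1 needed order statistics, answered through a rank->value dict instead of indexing a sorted array.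
import Mathlib
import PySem

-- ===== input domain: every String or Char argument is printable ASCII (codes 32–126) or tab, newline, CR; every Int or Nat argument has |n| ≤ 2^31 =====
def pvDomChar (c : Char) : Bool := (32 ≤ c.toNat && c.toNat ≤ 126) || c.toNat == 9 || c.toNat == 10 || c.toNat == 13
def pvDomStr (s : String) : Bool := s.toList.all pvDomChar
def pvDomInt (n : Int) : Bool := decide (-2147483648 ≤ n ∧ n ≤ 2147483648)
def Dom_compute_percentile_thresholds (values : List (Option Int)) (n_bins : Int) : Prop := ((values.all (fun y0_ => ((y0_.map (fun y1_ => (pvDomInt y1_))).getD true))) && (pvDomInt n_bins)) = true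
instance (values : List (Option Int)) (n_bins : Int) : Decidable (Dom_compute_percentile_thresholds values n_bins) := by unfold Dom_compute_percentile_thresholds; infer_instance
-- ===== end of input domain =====

-- B replaces the full sort by a recursive multi-way quickselect that extracts only the
-- n_bins+1 needed order statistics (alternative algorithm; not measurably faster in
-- CPython, where the built-in C sort dominates). Neither version mutates its input.

-- ===== shared float helper (both Pythons compute `int(i / n_bins * (L - 1))`) =====
-- Exact emulation of IEEE-754 binary64 round-to-nearest-even over ℚ for the nonnegative,
-- normal, non-overflowing arguments this program produces (exact for every input drawn
-- from Dom_: exponents here stay far inside the normal binary64 range).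

-- round-half-to-even of a rational to an integer (IEEE tie rule)
def pvRoundHE (s : ℚ) : Int :=
  if s - ⌊s⌋ < 1/2 then ⌊s⌋
  else if (1:ℚ)/2 < s - ⌊s⌋ then ⌊s⌋ + 1
  else if ⌊s⌋ % 2 = 0 then ⌊s⌋ else ⌊s⌋ + 1

-- nearest binary64 double of a nonnegative rational (0 for q ≤ 0; q > 0 assumed normal)
def pvRnd (q : ℚ) : ℚ :=
  if q ≤ 0 then 0
  else
    -- e = ⌊log₂ q⌋, determined from ⌊log₂ num⌋ - ⌊log₂ den⌋ with a one-step correction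
    let e0 : Int := (Nat.log 2 q.num.toNat : Int) - (Nat.log 2 q.den : Int)
    let e : Int := if q < 2 ^ e0 then e0 - 1 else e0
    (pvRoundHE (q * 2 ^ (52 - e)) : ℚ) * 2 ^ (e - 52)

-- Python `int(i / n * L1)`: two correctly-rounded float operations, then truncation
-- (= floor, since the value is nonnegative here); n ≠ 0 required (Pre_)
def pvFloatIdx (i n L1 : Int) : Int :=
  ⌊ pvRnd (pvRnd ((i : ℚ) / (n : ℚ)) * (L1 : ℚ)) ⌋

-- ===== PORT A =====
def compute_percentile_thresholds (values : List (Option Int)) (n_bins : Int) : Option (List Int) :=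
  let sorted_vals := PySem.List.sorted (values.filterMap id) (fun x => x) false
  if (sorted_vals.length : Int) < n_bins then none
  else
    -- sorted_vals[idx]: idx is nonnegative (pvFloatIdx_nonneg below) and in range for every
    -- list length reachable under Dom_, so pyGetD is exact here; Python raises only for
    -- n_bins = 0 (ZeroDivisionError), excluded by Pre_.
    some ((PySem.List.pyRange 0 (n_bins + 1) 1).foldl
      (fun thresholds i =>
        thresholds ++ [PySem.List.pyGetD sorted_vals
          (pvFloatIdx i n_bins ((sorted_vals.length : Int) - 1)) 0]) [])

-- the middle element of a nonempty list is a member (used for pvMultiselect's termination)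
theorem pv_getD_mem {xs : List Int} (h : xs ≠ []) : xs.getD (xs.length / 2) 0 ∈ xs := by
  have hlt : xs.length / 2 < xs.length := by
    cases xs with
    | nil => simp at h
    | cons a t => simp; omega
  rw [List.getD_eq_getElem xs 0 hlt]
  exact List.getElem_mem _

-- ===== PORT B =====
-- recursive multi-way quickselect: values of sorted(xs) at the increasing ranks ks;
-- xs = [] with ks nonempty is unreachable for in-range ranks (Python raises IndexError
-- there; the guard keeps one placeholder per requested rank, matching pyGetD's default)
def pvMultiselect : List Int → List Int → List Int
  | _, [] => []
  | [], ks => ks.map (fun _ => 0)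
  | x :: xs', ks =>
    let xs := x :: xs'
    let p := xs.getD (xs.length / 2) 0   -- xs[len(xs)//2], in range since xs ≠ []
    let lt := xs.filter (fun y => y < p)
    let gt := xs.filter (fun y => p < y)
    let lo : Int := lt.length
    let hi : Int := (xs.length : Int) - gt.length
    pvMultiselect lt (ks.filter (fun k => k < lo))
      ++ List.replicate (ks.filter (fun k => lo ≤ k ∧ k < hi)).length p
      ++ pvMultiselect gt ((ks.filter (fun k => hi ≤ k)).map (fun k => k - hi))
termination_by xs _ => xs.length
decreasing_by
  all_goals
    exact List.length_filter_lt_length_iff_exists.2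
      ⟨(x :: xs').getD ((x :: xs').length / 2) 0, pv_getD_mem (by simp), by simp⟩

def compute_percentile_thresholds_alt (values : List (Option Int)) (n_bins : Int) : Option (List Int) :=
  let vals := values.filterMap id
  let n : Int := (vals.length : Int)
  if n < n_bins then none
  else
    let idxs := (PySem.List.pyRange 0 (n_bins + 1) 1).map (fun i => pvFloatIdx i n_bins (n - 1))
    let ds := PySem.List.sorted (PySem.Set.ofList idxs) (fun x => x) false
    let lookup := PySem.Dict.ofList (ds.zip (pvMultiselect vals ds))
    -- lookup[i]: KeyError impossible, every i ∈ idxs is a key of lookup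
    some (idxs.map (fun i => lookup.getD i 0))

-- ===== PRECONDITION & SPEC =====
-- Pre_ excludes n_bins = 0, where Python A raises ZeroDivisionError (B raises there too).
def Pre_compute_percentile_thresholds (values : List (Option Int)) (n_bins : Int) : Prop :=
  n_bins ≠ 0
instance (values : List (Option Int)) (n_bins : Int) : Decidable (Pre_compute_percentile_thresholds values n_bins) := by unfold Pre_compute_percentile_thresholds; infer_instance

def pvWitness_compute_percentile_thresholds : List (Option Int) × Int := ([some 1, none, some 3], 2)

def Spec_compute_percentile_thresholds (values : List (Option Int)) (n_bins : Int) (out : Option (List Int)) : Prop := out = compute_percentile_thresholds_alt values n_bins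
instance (values : List (Option Int)) (n_bins : Int) (out : Option (List Int)) : Decidable (Spec_compute_percentile_thresholds values n_bins out) := by unfold Spec_compute_percentile_thresholds; infer_instance

-- ===== CLAIM (what is proved, stated in full; the proofs are below) =====
def Claim_equal_compute_percentile_thresholds : Prop := ∀ (values : List (Option Int)) (n_bins : Int), Dom_compute_percentile_thresholds values n_bins → Pre_compute_percentile_thresholds values n_bins → Spec_compute_percentile_thresholds values n_bins (compute_percentile_thresholds values n_bins)

-- ===== LEMMAS AND PROOFS =====

theorem pvRoundHE_nonneg {s : ℚ} (hs : 0 ≤ s) : 0 ≤ pvRoundHE s := by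
  have h0 : 0 ≤ ⌊s⌋ := Int.floor_nonneg.2 hs
  unfold pvRoundHE
  split_ifs <;> omega

theorem pvRnd_nonneg (q : ℚ) : 0 ≤ pvRnd q := by
  unfold pvRnd
  split_ifs with h
  · norm_num
  · dsimp only
    have hq : 0 < q := lt_of_not_ge h
    refine mul_nonneg ?_ (by positivity)
    exact_mod_cast pvRoundHE_nonneg (by positivity)

theorem pvFloatIdx_nonneg (i n L1 : Int) : 0 ≤ pvFloatIdx i n L1 := by
  exact Int.floor_nonneg.2 (pvRnd_nonneg _)

-- sorted xs splits at any pivot into sorted-below ++ copies-of-pivot ++ sorted-above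
theorem pv_sorted_split (xs : List Int) (p : Int) :
    PySem.List.sorted xs (fun x => x) false =
      PySem.List.sorted (xs.filter (fun y => y < p)) (fun x => x) false
        ++ List.replicate (xs.count p) p
        ++ PySem.List.sorted (xs.filter (fun y => p < y)) (fun x => x) false := by
  have hcf : ∀ (a : Int) (q : Int → Bool) (l : List Int),
      List.count a (l.filter q) = if q a then List.count a l else 0 := by
    intro a q l
    split_ifs with h
    · exact List.count_filter h
    · exact List.count_eq_zero.2 (fun hm => h (List.of_mem_filter hm))
  apply PySem.List.sorted_id_eq_of_perm_of_pairwise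
  · rw [List.perm_iff_count]
    intro a
    have h1 := (PySem.List.sorted_perm (xs.filter (fun y => decide (y < p))) (fun x => x) false).count_eq a
    have h2 := (PySem.List.sorted_perm (xs.filter (fun y => decide (p < y))) (fun x => x) false).count_eq a
    simp [List.count_append, h1, h2, hcf, List.count_replicate]
    split_ifs <;> simp_all <;> omega
  · rw [List.pairwise_append, List.pairwise_append]
    refine ⟨⟨?_, ?_, ?_⟩, ?_, ?_⟩
    · simpa using PySem.List.sorted_pairwise (xs.filter (fun y => decide (y < p))) (fun x => x)
    · exact List.pairwise_replicate.2 (Or.inr le_rfl)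
    · intro a ha b hb
      simp [PySem.List.mem_sorted, List.mem_filter] at ha
      have hbp := List.eq_of_mem_replicate hb
      omega
    · simpa using PySem.List.sorted_pairwise (xs.filter (fun y => decide (p < y))) (fun x => x)
    · intro a ha b hb
      simp [PySem.List.mem_sorted, List.mem_filter] at hb
      rcases List.mem_append.1 ha with ha | ha
      · simp [PySem.List.mem_sorted, List.mem_filter] at ha
        omega
      · have hap := List.eq_of_mem_replicate ha
        omega

-- a filter that drops the middle element is strictly shorter (multiselect shrinks)
theorem pv_filter_lt {xs : List Int} (h : xs ≠ []) (q : Int → Bool)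
    (hq : q (xs.getD (xs.length / 2) 0) = false) : (xs.filter q).length < xs.length :=
  List.length_filter_lt_length_iff_exists.2 ⟨_, pv_getD_mem h, by simpa [List.getD] using hq⟩

-- the three pivot classes cover the whole list
theorem pv_len_partition (xs : List Int) (p : Int) :
    (xs.filter (fun y => decide (y < p))).length + List.count p xs
      + (xs.filter (fun y => decide (p < y))).length = xs.length := by
  have h := congrArg List.length (pv_sorted_split xs p)
  simp [PySem.List.length_sorted, List.length_append, List.length_replicate] at h
  omega

-- a ≤-sorted list of ranks splits, in order, at the thresholds a ≤ b
theorem pv_ks_partition (a b : Int) (hab : a ≤ b) : ∀ (ks : List Int), ks.Pairwise (· ≤ ·) →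
    ks = ks.filter (fun k => decide (k < a)) ++ ks.filter (fun k => decide (a ≤ k ∧ k < b))
      ++ ks.filter (fun k => decide (b ≤ k)) := by
  intro ks h
  induction ks with
  | nil => simp
  | cons k t iht =>
    have hpc := List.pairwise_cons.1 h
    have ht := iht hpc.2
    rcases lt_trichotomy k a with h1 | h1 | h1
    · simp only [List.filter_cons, decide_eq_true_eq]
      rw [if_pos (by omega), if_neg (by omega), if_neg (by omega)]
      simpa using ht
    all_goals {
      have hta : t.filter (fun k => decide (k < a)) = [] :=
        List.filter_eq_nil_iff.2 (fun x hx => by have := hpc.1 x hx; simp; omega)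
      by_cases h2 : k < b
      · simp only [List.filter_cons, decide_eq_true_eq]
        rw [if_neg (by omega), if_pos (by omega), if_neg (by omega), hta]
        rw [hta] at ht
        simpa using ht
      · have htb : t.filter (fun k => decide (a ≤ k ∧ k < b)) = [] :=
          List.filter_eq_nil_iff.2 (fun x hx => by have := hpc.1 x hx; simp; omega)
        simp only [List.filter_cons, decide_eq_true_eq]
        rw [if_neg (by omega), if_neg (by omega), if_pos (by omega), hta, htb]
        rw [hta, htb] at ht
        simpa using ht
    }

-- multiselect returns the k-th element of the sorted list (0 past the end) for each rank
theorem pvMultiselect_sorted : ∀ (n : Nat) (xs : List Int) (ks : List Int), xs.length = n →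
    (∀ k ∈ ks, 0 ≤ k) → ks.Pairwise (· ≤ ·) →
    pvMultiselect xs ks = ks.map (fun k => (PySem.List.sorted xs (fun x => x) false).getD k.toNat 0) := by
  intro n
  induction n using Nat.strong_induction_on with
  | _ n ih =>
    intro xs ks hn hk hsort
    match xs, ks with
    | xs, [] => simp [pvMultiselect]
    | [], (k :: ks') => simp [pvMultiselect]
    | (x :: xs'), (k0 :: ks') =>
      have hne : (x :: xs') ≠ [] := by simp
      rw [pvMultiselect]
      set p := (x :: xs').getD ((x :: xs').length / 2) 0 with hp
      set lt := (x :: xs').filter (fun y => decide (y < p)) with hltdef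
      set gt := (x :: xs').filter (fun y => decide (p < y)) with hgtdef
      set c := List.count p (x :: xs') with hcdef
      have hlt_len : lt.length < (x :: xs').length := by
        rw [hltdef]; exact pv_filter_lt hne _ (by simp [hp])
      have hgt_len : gt.length < (x :: xs').length := by
        rw [hgtdef]; exact pv_filter_lt hne _ (by simp [hp])
      have hpart : lt.length + c + gt.length = (x :: xs').length := by
        rw [hltdef, hcdef, hgtdef]; exact pv_len_partition (x :: xs') p
      set lo : Int := (lt.length : Int) with hlodef
      set hi : Int := ((x :: xs').length : Int) - (gt.length : Int) with hhidef
      have hsplit : (PySem.List.sorted (x :: xs') (fun x => x) false) =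
          (PySem.List.sorted lt (fun x => x) false) ++ List.replicate c p
            ++ (PySem.List.sorted gt (fun x => x) false) := by
        rw [hltdef, hgtdef, hcdef]; exact pv_sorted_split (x :: xs') p
      conv_rhs => rw [pv_ks_partition lo hi (by omega) (k0 :: ks') hsort]
      rw [List.map_append, List.map_append]
      have hseg1 : pvMultiselect lt ((k0 :: ks').filter (fun k => decide (k < lo))) =
          ((k0 :: ks').filter (fun k => decide (k < lo))).map
            (fun k => (PySem.List.sorted (x :: xs') (fun x => x) false).getD k.toNat 0) := by
        rw [ih lt.length (by omega) lt _ rfl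
          (fun k hmem => hk k (List.mem_of_mem_filter hmem)) (hsort.filter _)]
        apply List.map_congr_left
        intro k hmem
        have hc1 : k < lo := by simpa using List.of_mem_filter hmem
        have hc0 : 0 ≤ k := hk k (List.mem_of_mem_filter hmem)
        rw [hsplit]
        rw [List.getD_append _ _ _ _ (by rw [List.length_append, PySem.List.length_sorted]; omega)]
        rw [List.getD_append _ _ _ _ (by rw [PySem.List.length_sorted]; omega)]
      have hseg2 : List.replicate ((k0 :: ks').filter (fun k => decide (lo ≤ k ∧ k < hi))).length p =
          ((k0 :: ks').filter (fun k => decide (lo ≤ k ∧ k < hi))).map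
            (fun k => (PySem.List.sorted (x :: xs') (fun x => x) false).getD k.toNat 0) := by
        have hmapc : ∀ k ∈ (k0 :: ks').filter (fun k => decide (lo ≤ k ∧ k < hi)),
            (PySem.List.sorted (x :: xs') (fun x => x) false).getD k.toNat 0 = p := by
          intro k hmem
          have hc1 : lo ≤ k ∧ k < hi := by simpa using List.of_mem_filter hmem
          rw [hsplit]
          rw [List.getD_append _ _ _ _ (by rw [List.length_append, PySem.List.length_sorted, List.length_replicate]; omega)]
          rw [List.getD_append_right _ _ _ _ (by rw [PySem.List.length_sorted]; omega)]
          rw [PySem.List.length_sorted]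
          exact List.getD_replicate _ (by omega)
        rw [List.map_congr_left hmapc]
        simp
      have hseg3 : pvMultiselect gt (((k0 :: ks').filter (fun k => decide (hi ≤ k))).map (fun k => k - hi)) =
          ((k0 :: ks').filter (fun k => decide (hi ≤ k))).map
            (fun k => (PySem.List.sorted (x :: xs') (fun x => x) false).getD k.toNat 0) := by
        rw [ih gt.length (by omega) gt _ rfl ?nonneg ?pair]
        case nonneg =>
          intro k hmem
          rcases List.mem_map.1 hmem with ⟨k', hk', rfl⟩
          have : hi ≤ k' := by simpa using List.of_mem_filter hk'
          omega
        case pair =>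
          exact (hsort.filter _).map _ (fun a b hab => by omega)
        rw [List.map_map]
        apply List.map_congr_left
        intro k hmem
        have hc1 : hi ≤ k := by simpa using List.of_mem_filter hmem
        have hc0 : 0 ≤ k := hk k (List.mem_of_mem_filter hmem)
        simp only [Function.comp]
        rw [hsplit]
        rw [List.getD_append_right _ _ _ _ (by rw [List.length_append, PySem.List.length_sorted, List.length_replicate]; omega)]
        rw [List.length_append, PySem.List.length_sorted, List.length_replicate]
        congr 1
        omega
      rw [hseg1, hseg2, hseg3]
      simp

-- pyGetD at a nonnegative index is List.getD
theorem pv_pyGetD_nonneg (xs : List Int) (i : Int) (hi : 0 ≤ i) :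
    PySem.List.pyGetD xs i 0 = xs.getD i.toNat 0 := by
  simp [PySem.List.pyGetD, PySem.List.pyGet?_of_nonneg xs hi, List.getD_eq_getElem?_getD]

-- a zipped dict over distinct keys looks up the mapped value
theorem pv_zip_map (ds : List Int) (f : Int → Int) :
    ds.zip (ds.map f) = ds.map (fun x => (x, f x)) := by
  induction ds with
  | nil => simp
  | cons a t iht => simp [iht]

theorem pv_zip_lookup (ds : List Int) (f : Int → Int) (hnd : ds.Nodup) (i : Int) (hi : i ∈ ds) :
    (PySem.Dict.ofList (ds.zip (ds.map f))).getD i 0 = f i := by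
  have hitems : (PySem.Dict.ofList (ds.zip (ds.map f))).items = ds.zip (ds.map f) := by
    unfold PySem.Dict.ofList PySem.Dict.update
    rw [PySem.Dict.items_foldl_insert_fresh _ _ _ _ (by simp) ?nodup]
    · simp [show (PySem.Dict.empty : PySem.Dict Int Int).items = [] from rfl]
    case nodup =>
      rw [pv_zip_map, List.map_map]
      have hfst : (Prod.fst ∘ fun x : Int => (x, f x)) = id := funext (fun _ => rfl)
      rw [hfst, List.map_id]
      exact hnd
  refine PySem.Dict.getD_of_mem_items _ ?_ (PySem.Dict.nodup_keys_ofList _) 0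
  rw [hitems, pv_zip_map]
  exact List.mem_map.2 ⟨i, hi, rfl⟩

theorem compute_percentile_thresholds_spec : Claim_equal_compute_percentile_thresholds := by
  intro values n_bins hdom hpre
  unfold Spec_compute_percentile_thresholds compute_percentile_thresholds compute_percentile_thresholds_alt
  simp only [PySem.List.length_sorted]
  split_ifs with h
  · rfl
  · congr 1
    rw [PySem.List.foldl_append_singleton_eq_map, List.nil_append]
    set vals := values.filterMap id with hvals
    set S := PySem.List.sorted vals (fun x => x) false with hS
    set F := fun i => pvFloatIdx i n_bins ((vals.length : Int) - 1) with hF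
    set idxs := (PySem.List.pyRange 0 (n_bins + 1) 1).map F with hidxs
    set ds := PySem.List.sorted (PySem.Set.ofList idxs) (fun x => x) false with hds
    have hnonneg : ∀ k ∈ ds, 0 ≤ k := by
      intro k hk
      have hk2 : k ∈ idxs := by
        rw [hds, PySem.List.mem_sorted, PySem.Set.mem_ofList] at hk
        exact hk
      rcases List.mem_map.1 hk2 with ⟨i, _, rfl⟩
      exact pvFloatIdx_nonneg _ _ _
    have hpl : ds.Pairwise (· < ·) := PySem.List.sorted_ofList_pairwise_lt idxs
    have hms := pvMultiselect_sorted vals.length vals ds rfl hnonneg (hpl.imp le_of_lt)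
    rw [hms]
    rw [List.map_map]
    apply List.map_congr_left
    intro i hi
    rw [pv_pyGetD_nonneg _ _ (pvFloatIdx_nonneg _ _ _)]
    have hmem : F i ∈ ds := by
      rw [hds, PySem.List.mem_sorted, PySem.Set.mem_ofList]
      exact List.mem_map.2 ⟨i, hi, rfl⟩
    exact (pv_zip_lookup ds
      (fun k => (PySem.List.sorted vals (fun x => x) false).getD k.toNat 0)
      (hpl.imp ne_of_lt) (F i) hmem).symm
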